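-- pv_equiv track=rewrite | github.com/Argonaught/playground | vig/split.py | splitByAlpha
-- ===== SOURCE A (Python) =====
-- def splitByAlpha(nAlpha, cipherText):
-- 	array = []
-- 	for i in range(0, nAlpha):
-- 		group = ''
-- 		array.append(group)
--
-- 	i = 0
-- 	while i < len(cipherText):
-- 		array[i % nAlpha] += cipherText[i]
-- 		i += 1
-- 	return array
-- ===== SOURCE B (Python) =====
-- def splitByAlpha(nAlpha, cipherText):
-- 	return [cipherText[j::nAlpha] for j in range(nAlpha)]
-- ===== Notes on version B (the rewrite author's own statement) =====
-- stated objective: faster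
-- what changed: Replaces the per-character distribution loop (append each char to bucket i % nAlpha) with one strided slice cipherText[j::nAlpha] per group; slicing runs at C speed instead of per-character string concatenation.
import Mathlib
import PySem

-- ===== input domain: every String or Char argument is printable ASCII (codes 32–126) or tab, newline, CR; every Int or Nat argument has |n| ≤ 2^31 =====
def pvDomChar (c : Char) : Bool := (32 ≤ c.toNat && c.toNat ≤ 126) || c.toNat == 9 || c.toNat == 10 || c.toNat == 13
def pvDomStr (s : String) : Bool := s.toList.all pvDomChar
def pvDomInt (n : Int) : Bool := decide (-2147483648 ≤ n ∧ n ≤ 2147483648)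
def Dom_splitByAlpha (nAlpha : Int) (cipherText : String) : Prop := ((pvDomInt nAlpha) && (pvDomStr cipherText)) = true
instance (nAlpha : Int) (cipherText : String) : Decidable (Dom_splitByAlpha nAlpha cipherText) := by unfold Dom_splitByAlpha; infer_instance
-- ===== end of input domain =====

-- B replaces A's per-character distribution loop by one strided slice per group (idiomatic; return value only, no mutation involved).

-- ===== PORT A =====
-- Python strings are carried as List Char (PySem.Chars) and converted at the end.
-- the 'for i in range(0, nAlpha): array.append('')' loop
def pvInitA (nAlpha : Int) : List (List Char) :=
  (PySem.List.pyRange 0 nAlpha 1).foldl (fun a _ => a ++ [([] : List Char)]) []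

-- the 'while i < len(cipherText): array[i % nAlpha] += cipherText[i]; i += 1' loop
-- (on inputs admitted by Pre_ the index i % nAlpha is always in range, so get/set by toNat is exact)
def pvLoopA (nAlpha : Int) : List Char → Int → List (List Char) → List (List Char)
  | [], _, arr => arr
  | c :: rest, i, arr =>
      let k := (PySem.Int.mod i nAlpha).toNat
      pvLoopA nAlpha rest (i + 1) (arr.set k (arr.getD k [] ++ [c]))

def splitByAlpha (nAlpha : Int) (cipherText : String) : List String :=
  (pvLoopA nAlpha cipherText.toList 0 (pvInitA nAlpha)).map String.ofList

-- ===== PORT B =====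
-- port of the slice cipherText[j::nAlpha] for 0 ≤ j and positive step nAlpha:
-- drop j, then keep every nAlpha-th character (exact there; Pre_/range guarantee this use)
def pvEvery (n : Nat) : List Char → List Char
  | [] => []
  | c :: rest => c :: pvEvery n (rest.drop (n - 1))
termination_by xs => xs.length
decreasing_by simp

def splitByAlpha_alt (nAlpha : Int) (cipherText : String) : List String :=
  (PySem.List.pyRange 0 nAlpha 1).map
    (fun j => String.ofList (pvEvery nAlpha.toNat (cipherText.toList.drop j.toNat)))

-- ===== PRECONDITION & SPEC =====
-- Pre_ excludes nAlpha ≤ 0 with non-empty cipherText: there A raises (ZeroDivisionError for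
-- nAlpha == 0, IndexError for negative nAlpha) and returns no value.
def Pre_splitByAlpha (nAlpha : Int) (cipherText : String) : Prop :=
  0 < nAlpha ∨ cipherText = ""
instance (nAlpha : Int) (cipherText : String) : Decidable (Pre_splitByAlpha nAlpha cipherText) := by
  unfold Pre_splitByAlpha; infer_instance

def pvWitness_splitByAlpha : Int × String := (3, "abcdefgh")

def Spec_splitByAlpha (nAlpha : Int) (cipherText : String) (out : List String) : Prop :=
  out = splitByAlpha_alt nAlpha cipherText
instance (nAlpha : Int) (cipherText : String) (out : List String) : Decidable (Spec_splitByAlpha nAlpha cipherText out) := by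
  unfold Spec_splitByAlpha; infer_instance

-- ===== CLAIM (what is proved, stated in full; the proofs are below) =====
def Claim_equal_splitByAlpha : Prop := ∀ (nAlpha : Int) (cipherText : String), Dom_splitByAlpha nAlpha cipherText → Pre_splitByAlpha nAlpha cipherText → Spec_splitByAlpha nAlpha cipherText (splitByAlpha nAlpha cipherText)

-- ===== LEMMAS AND PROOFS =====

lemma pvEvery_nil (n : Nat) : pvEvery n [] = [] := by rw [pvEvery.eq_def]

lemma pvEvery_cons (n : Nat) (c : Char) (r : List Char) :
    pvEvery n (c :: r) = c :: pvEvery n (r.drop (n - 1)) := by rw [pvEvery.eq_def]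

lemma pv_map_range_getD {α : Type} (arr : List α) (d : α) (m : Nat) (h : arr.length = m) :
    (List.range m).map (fun j => arr.getD j d) = arr := by
  apply List.ext_getElem
  · simp [h]
  · intro j h1 h2
    simp at h1
    simp [List.getD_eq_getElem?_getD, List.getElem?_eq_getElem (by omega : j < arr.length)]

lemma pv_loop_eq (n : Int) (hn : 0 < n) :
    ∀ (chars : List Char) (i : Int) (arr : List (List Char)), 0 ≤ i →
      arr.length = n.toNat →
      pvLoopA n chars i arr =
        (List.range n.toNat).map
          (fun j => arr.getD j [] ++ pvEvery n.toNat (chars.drop ((((j : Int) - i) % n).toNat))) := by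
  intro chars
  induction chars with
  | nil =>
    intro i arr _ hlen
    simp only [pvLoopA, List.drop_nil, pvEvery_nil, List.append_nil]
    exact (pv_map_range_getD arr [] n.toNat hlen).symm
  | cons c rest ih =>
    intro i arr hi hlen
    have hmod : PySem.Int.mod i n = i % n := PySem.Int.mod_eq_emod_of_pos hn
    simp only [pvLoopA]
    rw [ih (i + 1) _ (by omega) (by simp [hlen])]
    apply List.map_congr_left
    intro j hj
    simp only [List.mem_range] at hj
    have hjn : (j : Int) < n := by omega
    have hj0 : (0:Int) ≤ (j:Int) := by positivity
    set m : Int := ((j : Int) - i) % n with hm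
    have hm0 : 0 ≤ m := Int.emod_nonneg _ (by omega)
    have hmlt : m < n := Int.emod_lt_of_pos _ hn
    by_cases hcase : m = 0
    · -- the head char goes into bucket j
      have hjj : (j : Int) % n = i % n :=
        (Int.emod_eq_emod_iff_emod_sub_eq_zero).mpr (hm.symm.trans hcase)
      have hjm : (j : Int) % n = (j : Int) := Int.emod_eq_of_lt hj0 hjn
      have hk : (PySem.Int.mod i n).toNat = j := by
        rw [hmod, ← hjj, hjm]; simp
      obtain ⟨q, hqq⟩ : (n : Int) ∣ ((j:Int) - i) :=
        Int.dvd_of_emod_eq_zero (hm.symm.trans hcase)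
      have hprev : ((j : Int) - (i + 1)) % n = n - 1 := by
        have h2 : (j : Int) - (i + 1) = (n - 1) + (q - 1) * n := by
          rw [show (j:Int) - (i+1) = ((j:Int) - i) - 1 by ring, hqq]; ring
        rw [h2, Int.add_mul_emod_self_right, Int.emod_eq_of_lt (by omega) (by omega)]
      rw [hcase, hprev, hk]
      simp only [Int.toNat_zero, List.drop_zero]
      have hdropn : ((n : Int) - 1).toNat = n.toNat - 1 := by omega
      rw [pvEvery_cons, hdropn]
      have hset : (arr.set j (arr.getD j [] ++ [c])).getD j [] = arr.getD j [] ++ [c] := by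
        simp [List.getD_eq_getElem?_getD, (by omega : j < arr.length)]
      rw [hset]
      simp
    · -- bucket j untouched this step
      have hm1 : 1 ≤ m := by omega
      have hk : (PySem.Int.mod i n).toNat ≠ j := by
        intro h
        apply hcase
        have h0 : 0 ≤ i % n := Int.emod_nonneg _ (by omega)
        have hkj : i % n = (j : Int) := by rw [hmod] at h; omega
        have hq := Int.mul_ediv_add_emod i n
        have hji : (j:Int) - i = (-(i / n)) * n := by
          rw [← hkj]; linear_combination hq
        rw [hm, hji]
        simp
      have hprev : ((j : Int) - (i + 1)) % n = m - 1 := by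
        have hq := Int.mul_ediv_add_emod ((j:Int) - i) n
        have h2 : (j : Int) - (i + 1) = (m - 1) + (((j:Int) - i) / n) * n := by
          rw [show (j:Int) - (i+1) = ((j:Int) - i) - 1 by ring]
          rw [hm]; linear_combination -hq
        rw [h2, Int.add_mul_emod_self_right, Int.emod_eq_of_lt (by omega) (by omega)]
      have hset : (arr.set (PySem.Int.mod i n).toNat
          (arr.getD (PySem.Int.mod i n).toNat [] ++ [c])).getD j [] = arr.getD j [] := by
        simp [List.getD_eq_getElem?_getD, List.getElem?_set_ne hk]
      have hdrop : (c :: rest).drop m.toNat = rest.drop ((m - 1).toNat) := by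
        rw [show m.toNat = (m - 1).toNat + 1 by omega, List.drop_succ_cons]
      rw [hprev, hset, hdrop]

lemma pv_foldl_append_rep {α : Type} (x : α) :
    ∀ (l : List Int) (acc : List α),
      l.foldl (fun a _ => a ++ [x]) acc = acc ++ List.replicate l.length x := by
  intro l
  induction l with
  | nil => intro acc; simp
  | cons h t ih =>
    intro acc
    rw [List.foldl_cons, ih, List.append_assoc]
    simp [List.replicate_succ]

lemma pv_init_eq (n : Int) : pvInitA n = List.replicate n.toNat ([] : List Char) := by
  unfold pvInitA
  rw [pv_foldl_append_rep]
  simp [PySem.List.length_pyRange_one]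

-- ===== VERDICT (by name: the statement is the Claim_ definition above) =====
theorem splitByAlpha_spec : Claim_equal_splitByAlpha := by
  intro n s _ hpre
  unfold Spec_splitByAlpha
  rcases hpre with hn | hs
  · -- 0 < nAlpha : main case
    unfold splitByAlpha splitByAlpha_alt
    rw [pv_init_eq, pv_loop_eq n hn s.toList 0 _ le_rfl (by simp)]
    rw [PySem.List.pyRange_one]
    simp only [Int.sub_zero, List.map_map]
    apply List.map_congr_left
    intro j hj
    simp only [List.mem_range] at hj
    have hjn : (j : Int) < n := by omega
    have hjm : (j : Int) % n = (j : Int) := Int.emod_eq_of_lt (by positivity) hjn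
    simp [Function.comp, hjm]
  · -- cipherText = "" (covers nAlpha ≤ 0 too when combined with the text being empty)
    subst hs
    by_cases hn : 0 < n
    · unfold splitByAlpha splitByAlpha_alt
      rw [pv_init_eq, pv_loop_eq n hn _ 0 _ le_rfl (by simp)]
      rw [PySem.List.pyRange_one]
      simp [pvEvery_nil]
      apply List.ext_getElem <;> simp
    · unfold splitByAlpha splitByAlpha_alt
      rw [PySem.List.pyRange_one_eq_nil (by omega)]
      simp [pvLoopA, pvInitA, PySem.List.pyRange_one_eq_nil (by omega : n ≤ 0)]
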